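-- pv_equiv track=rewrite | github.com/mowja/CbtProgram_json | quiz_gui.py | normalize_user_answer
-- ===== SOURCE A (Python) =====
-- LETTERS = "ABCDEFGHIJKLMNOPQRSTUVWXYZ"
--
-- def normalize_user_answer(s: str, max_labels: int):
--     if not s: return []
--     s = s.strip().upper()
--     for ch in [" ", ",", "/", "&", ";", "|", "｜", "、", "，", "／", "＆"]:
--         s = s.replace(ch, "")
--     out = []
--     map_num = {str(i): LETTERS[i-1] for i in range(1, 27)}
--     allowed = set(LETTERS[:max_labels])
--     for ch in s:
--         if ch in allowed:
--             out.append(ch)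
--         elif ch in map_num and map_num[ch] in allowed:
--             out.append(map_num[ch])
--     # 중복 제거 + 라벨 순서 정렬
--     return sorted(set(out), key=lambda x: LETTERS.index(x))
-- ===== SOURCE B (Python) =====
-- LETTERS = "ABCDEFGHIJKLMNOPQRSTUVWXYZ"
--
-- def normalize_user_answer(s: str, max_labels: int):
--     if not s: return []
--     s = s.strip().upper()
--     for ch in [" ", ",", "/", "&", ";", "|", "｜", "、", "，", "／", "＆"]:
--         s = s.replace(ch, "")
--     return [L for i, L in enumerate(LETTERS[:max_labels])
--             if L in s or (i < 9 and str(i + 1) in s)]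
-- ===== Notes on version B (the rewrite author's own statement) =====
-- stated objective: simpler
-- what changed: Instead of scanning the cleaned string char-by-char with a 26-entry digit dict and then deduplicating and sorting, B iterates once over the candidate labels LETTERS[:max_labels] and keeps each label whose letter (or, for the first nine, its digit alias) occurs in the cleaned string, producing the result already unique and in label order with no set/sort pass.
import Mathlib
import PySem

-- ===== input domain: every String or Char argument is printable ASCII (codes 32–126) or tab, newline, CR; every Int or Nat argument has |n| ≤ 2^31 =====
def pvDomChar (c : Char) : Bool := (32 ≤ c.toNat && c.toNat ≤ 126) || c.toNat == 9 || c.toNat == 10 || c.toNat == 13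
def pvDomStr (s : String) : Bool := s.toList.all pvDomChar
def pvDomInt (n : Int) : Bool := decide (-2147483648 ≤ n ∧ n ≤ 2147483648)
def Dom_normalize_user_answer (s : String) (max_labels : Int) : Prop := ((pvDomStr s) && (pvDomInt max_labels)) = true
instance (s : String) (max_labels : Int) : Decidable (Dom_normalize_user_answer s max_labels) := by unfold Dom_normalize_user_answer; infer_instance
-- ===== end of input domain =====

-- B replaces A's char-by-char scan + digit dict + dedup/sort pass by one filter over the
-- candidate labels themselves (objective: simpler — the output is produced already unique and in order).

-- ===== PORT A =====
-- LETTERS, as a list of code points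
def pvL : List Char := "ABCDEFGHIJKLMNOPQRSTUVWXYZ".toList

-- s.strip().upper() followed by the delimiter-removal loop (shared verbatim by A and B)
def pvClean (s : String) : List Char :=
  ([" ", ",", "/", "&", ";", "|", "｜", "、", "，", "／", "＆"].foldl
    (fun acc ch => PySem.Str.replace acc ch "") (PySem.Str.upper (PySem.Str.strip s))).toList

-- map_num = {str(i): LETTERS[i-1] for i in range(1, 27)}; the 1-character string values are
-- modeled as Char; the .getD 'A' default is unreachable (1 ≤ i ≤ 26 keeps the index in range)
def pvMapNum : PySem.Dict String Char :=
  PySem.Dict.ofList ((PySem.List.pyRange 1 27 1).map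
    (fun i => (PySem.Int.toStr i, (PySem.List.pyGet? pvL (i - 1)).getD 'A')))

-- the sort key LETTERS.index(x); x is always a member of LETTERS, so .index = .find (no ValueError)
def pvKey (c : Char) : Int := PySem.Chars.find pvL [c]

def normalize_user_answer (s : String) (max_labels : Int) : List String :=
  if s = "" then []
  else
    let cs := pvClean s
    let allowed : PySem.Set Char := PySem.Set.ofList (PySem.List.slice pvL none (some max_labels))
    let out : List Char := cs.foldl (fun acc ch =>
      if PySem.Set.contains allowed ch then acc ++ [ch]
      else match pvMapNum.get? (String.ofList [ch]) with
           | some m => if PySem.Set.contains allowed m then acc ++ [m] else acc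
           | none => acc) []
    (PySem.List.sorted (PySem.Set.ofList out) pvKey false).map (fun c => String.ofList [c])

-- ===== PORT B =====
def normalize_user_answer_alt (s : String) (max_labels : Int) : List String :=
  if s = "" then []
  else
    let cs := pvClean s
    (PySem.List.enumerate (PySem.List.slice pvL none (some max_labels)) 0).filterMap (fun p =>
      if PySem.Chars.isIn [p.2] cs
         || (decide (p.1 < 9) && PySem.Chars.isIn (PySem.Int.toChars (p.1 + 1)) cs)
      then some (String.ofList [p.2]) else none)

-- ===== PRECONDITION & SPEC =====
def Spec_normalize_user_answer (s : String) (max_labels : Int) (out : List String) : Prop := out = normalize_user_answer_alt s max_labels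
instance (s : String) (max_labels : Int) (out : List String) : Decidable (Spec_normalize_user_answer s max_labels out) := by unfold Spec_normalize_user_answer; infer_instance

-- ===== CLAIM (what is proved, stated in full; the proofs are below) =====
def Claim_equal_normalize_user_answer : Prop := ∀ (s : String) (max_labels : Int), Dom_normalize_user_answer s max_labels → Spec_normalize_user_answer s max_labels (normalize_user_answer s max_labels)

-- ===== LEMMAS AND PROOFS =====

lemma pvL_nodup : pvL.Nodup := by
  have h : (pvL.map Char.toNat).Nodup := by decide
  exact h.of_map

set_option maxRecDepth 10000 in
lemma pvL_pairwise : pvL.Pairwise (fun a b => pvKey a < pvKey b) := by decide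

set_option maxRecDepth 4000 in
lemma pvL_range : ∀ c ∈ pvL, 65 ≤ c.toNat ∧ c.toNat ≤ 90 := by
  have h : (pvL.map Char.toNat).all (fun n => 65 ≤ n && n ≤ 90) = true := by decide
  intro c hc
  have h2 := List.all_eq_true.mp h _ (List.mem_map_of_mem hc)
  simp at h2
  omega

lemma pv_isIn_singleton (c : Char) (l : List Char) : PySem.Chars.isIn [c] l = true ↔ c ∈ l := by
  rw [PySem.Chars.isIn_iff_infix]
  constructor
  · intro h; exact List.singleton_sublist.mp h.sublist
  · intro h; obtain ⟨p, q, rfl⟩ := List.append_of_mem h; exact ⟨p, q, by simp⟩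

-- LETTERS[:max_labels] is a prefix of LETTERS
lemma pv_slice_take (m : Int) : ∃ k, PySem.List.slice pvL none (some m) = pvL.take k := by
  rcases le_or_gt 0 m with h | h
  · exact ⟨m.toNat, PySem.List.slice_to pvL h⟩
  · obtain ⟨n, hn1, hn2⟩ : ∃ n : Nat, m = -(n : Int) ∧ 0 < n := ⟨(-m).toNat, by omega, by omega⟩
    refine ⟨pvL.length - n, ?_⟩
    rw [hn1]
    exact PySem.List.slice_to_neg_natCast pvL n hn2

lemma pv_toChars_digit : ∀ i : Nat, i < 9 → PySem.Int.toChars ((i : Int) + 1) = [Char.ofNat (49 + i)] := by decide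

lemma pv_ofNat_digit_toNat : ∀ i : Nat, i < 9 → (Char.ofNat (49 + i)).toNat = 49 + i := by decide

lemma pv_char_eq_of_toNat {d : Char} {n : Nat} (h : d.toNat = n) : d = Char.ofNat n := by
  have := Char.ofNat_toNat d
  rw [h] at this
  exact this.symm

lemma pvMapNum_keys : pvMapNum.keys = ["1","2","3","4","5","6","7","8","9","10","11","12","13","14","15","16","17","18","19","20","21","22","23","24","25","26"] := by decide

lemma pv_get?_pvMapNum (d : Char) :
    pvMapNum.get? (String.ofList [d]) =
      if 49 ≤ d.toNat ∧ d.toNat ≤ 57 then pvL[d.toNat - 49]? else none := by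
  by_cases hd : 49 ≤ d.toNat ∧ d.toNat ≤ 57
  · have h9 : d.toNat = 49 ∨ d.toNat = 50 ∨ d.toNat = 51 ∨ d.toNat = 52 ∨ d.toNat = 53 ∨
        d.toNat = 54 ∨ d.toNat = 55 ∨ d.toNat = 56 ∨ d.toNat = 57 := by omega
    rcases h9 with h | h | h | h | h | h | h | h | h <;>
      (rw [pv_char_eq_of_toNat h]; decide)
  · rw [if_neg hd]
    rw [PySem.Dict.get?_eq_none_iff_not_mem_keys, pvMapNum_keys]
    intro hmem
    simp only [List.mem_cons, List.not_mem_nil, or_false] at hmem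
    rcases hmem with h | h | h | h | h | h | h | h | h | h | h | h | h | h | h | h | h | h | h | h | h | h | h | h | h | h <;>
      (have h2 := congrArg String.toList h; simp at h2) <;>
      (subst h2; exact hd (by decide))

-- one step of A's collection loop, as a list-valued function
def pvG (L : List Char) (ch : Char) : List Char :=
  if PySem.Set.contains (PySem.Set.ofList L) ch then [ch]
  else match pvMapNum.get? (String.ofList [ch]) with
       | some m => if PySem.Set.contains (PySem.Set.ofList L) m then [m] else []
       | none => []

lemma pv_out_eq_flatMap (cs : List Char) (L : List Char) :
    cs.foldl (fun acc ch =>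
      if PySem.Set.contains (PySem.Set.ofList L) ch then acc ++ [ch]
      else match pvMapNum.get? (String.ofList [ch]) with
           | some m => if PySem.Set.contains (PySem.Set.ofList L) m then acc ++ [m] else acc
           | none => acc) []
    = cs.flatMap (pvG L) := by
  have h : (fun (acc : List Char) ch =>
      if PySem.Set.contains (PySem.Set.ofList L) ch then acc ++ [ch]
      else match pvMapNum.get? (String.ofList [ch]) with
           | some m => if PySem.Set.contains (PySem.Set.ofList L) m then acc ++ [m] else acc
           | none => acc)
      = fun acc ch => acc ++ pvG L ch := by
    funext acc ch
    unfold pvG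
    by_cases hc : ch ∈ L
    · simp [hc]
    · cases hget : pvMapNum.get? (String.ofList [ch]) with
      | none => simp [hc]
      | some m =>
        by_cases hm : m ∈ L
        · simp [hc, hm]
        · simp [hc, hm]
  rw [h, PySem.List.foldl_append_eq_flatMap]
  simp

lemma pv_mem_pvG {k : Nat} (ch c : Char) :
    c ∈ pvG (pvL.take k) ch ↔ c ∈ pvL.take k ∧
      (ch = c ∨ (49 ≤ ch.toNat ∧ ch.toNat ≤ 57 ∧ pvL[ch.toNat - 49]? = some c)) := by
  have hsub : ∀ x ∈ pvL.take k, 65 ≤ x.toNat ∧ x.toNat ≤ 90 := fun x hx =>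
    pvL_range x (List.mem_of_mem_take hx)
  by_cases hc : ch ∈ pvL.take k
  · have hG : pvG (pvL.take k) ch = [ch] := by simp [pvG, hc]
    rw [hG, List.mem_singleton]
    constructor
    · intro h; subst h; exact ⟨hc, Or.inl rfl⟩
    · rintro ⟨hcL, h | ⟨h49, h57, _⟩⟩
      · exact h.symm
      · exact absurd (hsub ch hc) (by omega)
  · by_cases hd : 49 ≤ ch.toNat ∧ ch.toNat ≤ 57
    · have hidx : ch.toNat - 49 < pvL.length := by
        have : pvL.length = 26 := by decide
        omega
      by_cases hm : pvL[ch.toNat - 49] ∈ pvL.take k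
      · have hG : pvG (pvL.take k) ch = [pvL[ch.toNat - 49]] := by
          simp [pvG, hc, pv_get?_pvMapNum, hd, List.getElem?_eq_getElem hidx, hm]
        rw [hG, List.mem_singleton]
        constructor
        · intro h; subst h
          exact ⟨hm, Or.inr ⟨hd.1, hd.2, (List.getElem?_eq_getElem hidx).symm ▸ rfl⟩⟩
        · rintro ⟨hcL, h | ⟨h49, h57, hsome⟩⟩
          · exact absurd (hsub ch (h ▸ hcL)) (by omega)
          · rw [List.getElem?_eq_getElem hidx] at hsome
            exact (Option.some_inj.mp hsome).symm
      · have hG : pvG (pvL.take k) ch = [] := by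
          simp [pvG, hc, pv_get?_pvMapNum, hd, List.getElem?_eq_getElem hidx, hm]
        rw [hG]
        simp only [List.not_mem_nil, false_iff]
        rintro ⟨hcL, h | ⟨h49, h57, hsome⟩⟩
        · exact absurd (hsub ch (h ▸ hcL)) (by omega)
        · rw [List.getElem?_eq_getElem hidx] at hsome
          rw [← Option.some_inj.mp hsome] at hcL
          exact absurd hcL hm
    · have hG : pvG (pvL.take k) ch = [] := by
        simp [pvG, hc, pv_get?_pvMapNum, hd]
      rw [hG]
      simp only [List.not_mem_nil, false_iff]
      rintro ⟨hcL, h | ⟨h49, h57, _⟩⟩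
      · exact absurd (h ▸ hcL) hc
      · exact absurd hd (by omega)


-- filterMap of an if-some-none selection is a sublist of the map
lemma pv_filterMap_sublist {α β : Type} (l : List α) (p : α → Bool) (g : α → β) :
    (l.filterMap (fun x => if p x then some (g x) else none)).Sublist (l.map g) := by
  induction l with
  | nil => simp
  | cons x t ih =>
    by_cases h : p x = true
    · simpa [h] using ih.cons₂ (g x)
    · simp only [List.filterMap_cons, h, Bool.false_eq_true, if_false, List.map_cons]
      exact ih.cons (g x)

-- B's per-label test, translated to plain membership
lemma pv_cond_iff (cs : List Char) (i : Nat) (c : Char) :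
    (PySem.Chars.isIn [c] cs
      || (decide (((0:Int) + (i:Int)) < 9)
          && PySem.Chars.isIn (PySem.Int.toChars (((0:Int) + (i:Int)) + 1)) cs)) = true
    ↔ (c ∈ cs ∨ (i < 9 ∧ Char.ofNat (49 + i) ∈ cs)) := by
  rw [Bool.or_eq_true, Bool.and_eq_true, pv_isIn_singleton]
  by_cases hi : i < 9
  · have h1 : decide (((0:Int) + (i:Int)) < 9) = true := by
      simp only [decide_eq_true_eq]; omega
    have h2 : ((0:Int) + (i:Int)) + 1 = ((i : Int) + 1) := by ring
    rw [h1, h2, pv_toChars_digit i hi, pv_isIn_singleton]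
    simp [hi]
  · have h1 : decide (((0:Int) + (i:Int)) < 9) = false := by
      simp only [decide_eq_false_iff_not]; omega
    rw [h1]
    simp [hi]

-- membership in A's collected list
lemma pv_flat_mem (cs : List Char) (k : Nat) (c : Char) :
    c ∈ cs.flatMap (pvG (pvL.take k)) ↔
      (c ∈ pvL.take k ∧ (c ∈ cs ∨ ∃ ch ∈ cs, 49 ≤ ch.toNat ∧ ch.toNat ≤ 57 ∧ pvL[ch.toNat - 49]? = some c)) := by
  rw [List.mem_flatMap]
  constructor
  · rintro ⟨ch, hch, hmem⟩
    obtain ⟨hcL, hcase⟩ := (pv_mem_pvG ch c).mp hmem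
    refine ⟨hcL, ?_⟩
    rcases hcase with h | ⟨a, b, hsome⟩
    · exact Or.inl (h ▸ hch)
    · exact Or.inr ⟨ch, hch, a, b, hsome⟩
  · rintro ⟨hcL, hcs | ⟨ch, hch, a, b, hsome⟩⟩
    · exact ⟨c, hcs, (pv_mem_pvG c c).mpr ⟨hcL, Or.inl rfl⟩⟩
    · exact ⟨ch, hch, (pv_mem_pvG ch c).mpr ⟨hcL, Or.inr ⟨a, b, hsome⟩⟩⟩

-- the two membership characterisations coincide
lemma pv_bridge (cs : List Char) (k : Nat) (c : Char) :
    (∃ i : Nat, ∃ _ : i < (pvL.take k).length, (pvL.take k)[i] = c ∧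
        (c ∈ cs ∨ (i < 9 ∧ Char.ofNat (49 + i) ∈ cs)))
    ↔ (c ∈ pvL.take k ∧ (c ∈ cs ∨ ∃ ch ∈ cs, 49 ≤ ch.toNat ∧ ch.toNat ≤ 57 ∧ pvL[ch.toNat - 49]? = some c)) := by
  have hlen : (pvL.take k).length ≤ pvL.length := by
    simp [List.length_take]
  constructor
  · rintro ⟨i, hi, hic, hcnd⟩
    refine ⟨hic ▸ List.getElem_mem hi, ?_⟩
    rcases hcnd with h | ⟨hi9, hdig⟩
    · exact Or.inl h
    · right
      have ht := pv_ofNat_digit_toNat i hi9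
      refine ⟨Char.ofNat (49 + i), hdig, by omega, by omega, ?_⟩
      rw [ht]
      have h49 : 49 + i - 49 = i := by omega
      have hlt : i < pvL.length := lt_of_lt_of_le hi hlen
      rw [h49, List.getElem?_eq_getElem hlt, ← hic, List.getElem_take]
  · rintro ⟨hcL, hcs | ⟨ch, hch, a, b, hsome⟩⟩
    · obtain ⟨i, hi, hic⟩ := List.mem_iff_getElem.mp hcL
      exact ⟨i, hi, hic, Or.inl hcs⟩
    · obtain ⟨i, hi, hic⟩ := List.mem_iff_getElem.mp hcL
      have hipv : i < pvL.length := lt_of_lt_of_le hi hlen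
      have hj : ch.toNat - 49 < pvL.length := by
        have : pvL.length = 26 := by decide
        omega
      rw [List.getElem?_eq_getElem hj] at hsome
      have h1 : pvL[i] = c := by rw [← hic, List.getElem_take]
      have hij : i = ch.toNat - 49 := by
        apply (List.Nodup.getElem_inj_iff pvL_nodup).mp
        rw [h1, Option.some_inj.mp hsome]
      refine ⟨i, hi, hic, Or.inr ⟨by omega, ?_⟩⟩
      have h2 : 49 + i = ch.toNat := by omega
      rw [h2, Char.ofNat_toNat]
      exact hch

-- the core equality, with the slice written as a take
lemma pv_main_take (cs : List Char) (k : Nat) :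
    PySem.List.sorted (PySem.Set.ofList (cs.flatMap (pvG (pvL.take k)))) pvKey false
    = (PySem.List.enumerate (pvL.take k) 0).filterMap (fun p =>
        if PySem.Chars.isIn [p.2] cs
           || (decide (p.1 < 9) && PySem.Chars.isIn (PySem.Int.toChars (p.1 + 1)) cs)
        then some p.2 else none) := by
  have hLsub : (pvL.take k).Sublist pvL := List.take_sublist k pvL
  have hcanon_sub : ((PySem.List.enumerate (pvL.take k) 0).filterMap (fun p =>
      if PySem.Chars.isIn [p.2] cs
         || (decide (p.1 < 9) && PySem.Chars.isIn (PySem.Int.toChars (p.1 + 1)) cs)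
      then some p.2 else none)).Sublist (pvL.take k) := by
    have h := pv_filterMap_sublist (PySem.List.enumerate (pvL.take k) 0)
      (fun p => PySem.Chars.isIn [p.2] cs
         || (decide (p.1 < 9) && PySem.Chars.isIn (PySem.Int.toChars (p.1 + 1)) cs))
      (fun p => p.2)
    rwa [PySem.List.map_snd_enumerate] at h
  apply PySem.List.sorted_eq_of_perm_of_pairwise_lt
  · apply (List.perm_ext_iff_of_nodup
      (pvL_nodup.sublist (hcanon_sub.trans hLsub))
      (PySem.Set.nodup_ofList _)).mpr
    intro c
    rw [PySem.Set.mem_ofList, List.mem_filterMap]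
    constructor
    · rintro ⟨p, hp, hpc⟩
      obtain ⟨i, hi, rfl⟩ := (PySem.List.mem_enumerate_iff _ _ _).mp hp
      rw [ite_eq_iff] at hpc
      rcases hpc with ⟨hcnd, hc⟩ | ⟨_, hfalse⟩
      · have hc2 : (pvL.take k)[i] = c := Option.some_inj.mp hc
        dsimp only at hcnd
        rw [hc2] at hcnd
        have hcnd2 := (pv_cond_iff cs i c).mp hcnd
        exact (pv_flat_mem cs k c).mpr ((pv_bridge cs k c).mp ⟨i, hi, hc2, hcnd2⟩)
      · exact absurd hfalse (by simp)
    · intro hmem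
      obtain ⟨i, hi, hic, hcnd⟩ := (pv_bridge cs k c).mpr ((pv_flat_mem cs k c).mp hmem)
      refine ⟨((0:Int) + (i:Int), (pvL.take k)[i]), (PySem.List.mem_enumerate_iff _ _ _).mpr ⟨i, hi, rfl⟩, ?_⟩
      rw [if_pos ((pv_cond_iff cs i (pvL.take k)[i]).mpr (by rw [hic]; exact hcnd))]
      rw [hic]
  · exact pvL_pairwise.sublist (hcanon_sub.trans hLsub)

-- ===== VERDICT (by name: the statement is the Claim_ definition above) =====
set_option maxRecDepth 10000 in
theorem normalize_user_answer_spec : Claim_equal_normalize_user_answer := by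
  intro s m _
  unfold Spec_normalize_user_answer normalize_user_answer normalize_user_answer_alt
  by_cases hs : s = ""
  · simp [hs]
  · simp only [hs, if_false]
    obtain ⟨k, hk⟩ := pv_slice_take m
    rw [hk, pv_out_eq_flatMap, pv_main_take]
    rw [List.map_filterMap]
    refine List.filterMap_congr ?_
    intro p _
    by_cases h : (PySem.Chars.isIn [p.2] (pvClean s)
        || (decide (p.1 < 9) && PySem.Chars.isIn (PySem.Int.toChars (p.1 + 1)) (pvClean s))) = true
    · simp [h]
    · simp [h]
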